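-- pv_equiv track=rewrite | github.com/MitsudoAI/mcp-style-agent | src/mcps/deep_thinking/config/flow_hot_update.py | _determine_impact_level
-- ===== SOURCE A (Python) =====
-- from typing import Any, Dict, List, Optional, Set, Tuple
--
-- def _determine_impact_level(changes: List[Dict[str, Any]]) -> str:
--     """Determine overall impact level of changes"""
--     if not changes:
--         return "none"
--
--     impact_levels = [change.get("impact", "low") for change in changes]
--
--     if "breaking" in impact_levels:
--         return "breaking"
--     elif "high" in impact_levels:
--         return "high"
--     elif "medium" in impact_levels:
--         return "medium"
--     else:
--         return "low"
-- ===== SOURCE B (Python) =====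
-- def _determine_impact_level(changes):
--     """Determine overall impact level of changes"""
--     if not changes:
--         return "none"
--     rank = {"low": 0, "medium": 1, "high": 2, "breaking": 3}
--     best = 0
--     for change in changes:
--         best = max(best, rank.get(change.get("impact", "low"), 0))
--     return ["low", "medium", "high", "breaking"][best]
-- ===== Notes on version B (the rewrite author's own statement) =====
-- stated objective: alternative
-- what changed: Replaces the three ordered membership scans over a pre-built impact list with a single max-of-ranks pass using a label-to-rank dictionary, converting the maximum rank back to its label at the end.
import Mathlib
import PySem

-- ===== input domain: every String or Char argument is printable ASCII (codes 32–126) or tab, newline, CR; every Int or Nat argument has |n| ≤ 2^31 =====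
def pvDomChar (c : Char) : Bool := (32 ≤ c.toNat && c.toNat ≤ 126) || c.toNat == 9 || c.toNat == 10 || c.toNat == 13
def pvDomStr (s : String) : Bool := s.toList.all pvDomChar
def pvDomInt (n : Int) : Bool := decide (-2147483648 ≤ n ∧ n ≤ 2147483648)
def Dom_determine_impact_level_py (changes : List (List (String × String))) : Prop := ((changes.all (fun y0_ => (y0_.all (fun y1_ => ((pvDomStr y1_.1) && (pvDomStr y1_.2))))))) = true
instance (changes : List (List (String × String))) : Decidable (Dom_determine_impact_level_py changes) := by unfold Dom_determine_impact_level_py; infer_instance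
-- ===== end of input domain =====

-- ===== PORT A =====
-- change.get("impact", "low"): first-match lookup in the change's association list
def pvGetImpact (change : List (String × String)) : String :=
  (PySem.Dict.mk change).getD "impact" "low"

-- Port of A: build the list of impact levels, then three ordered membership scans.
def determine_impact_level_py (changes : List (List (String × String))) : String :=
  if changes = [] then "none"
  else
    let impact_levels := changes.map pvGetImpact
    if impact_levels.contains "breaking" then "breaking"
    else if impact_levels.contains "high" then "high"
    else if impact_levels.contains "medium" then "medium"
    else "low"

-- ===== PORT B =====
-- B's rank dictionary {"low":0,"medium":1,"high":2,"breaking":3}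
def pvRankDict : PySem.Dict String Int :=
  PySem.Dict.ofList [("low", 0), ("medium", 1), ("high", 2), ("breaking", 3)]

-- Port of B: one pass computing the maximum rank, then index into the label list.
def determine_impact_level_py_alt (changes : List (List (String × String))) : String :=
  if changes = [] then "none"
  else
    let best := changes.foldl
      (fun best change => max best (pvRankDict.getD (pvGetImpact change) 0)) 0
    PySem.List.pyGetD ["low", "medium", "high", "breaking"] best "low"

-- ===== PRECONDITION & SPEC =====
def Spec_determine_impact_level_py (changes : List (List (String × String))) (out : String) : Prop := out = determine_impact_level_py_alt changes
instance (changes : List (List (String × String))) (out : String) : Decidable (Spec_determine_impact_level_py changes out) := by unfold Spec_determine_impact_level_py; infer_instance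

-- ===== CLAIM (what is proved, stated in full; the proofs are below) =====
def Claim_equal_determine_impact_level_py : Prop := ∀ (changes : List (List (String × String))), Dom_determine_impact_level_py changes → Spec_determine_impact_level_py changes (determine_impact_level_py changes)

-- ===== LEMMAS AND PROOFS =====

-- proof-side abbreviation for B's per-change rank lookup
def pvRk (s : String) : Int := pvRankDict.getD s 0

lemma pvRk_eq (s : String) : pvRk s =
    if "low" = s then 0 else if "medium" = s then 1 else if "high" = s then 2
    else if "breaking" = s then 3 else 0 := by
  have h : pvRankDict = PySem.Dict.mk [("low", 0), ("medium", 1), ("high", 2), ("breaking", 3)] := by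
    rfl
  rw [pvRk, h]
  simp only [PySem.Dict.getD_eq_get?_getD, PySem.Dict.get?_mk_cons, beq_iff_eq]
  split_ifs <;> rfl

lemma pvRk_nonneg (s : String) : 0 ≤ pvRk s := by
  rw [pvRk_eq]; split_ifs <;> norm_num

lemma pvFoldl_max_acc (l : List String) (a : Int) (ha : 0 ≤ a) :
    l.foldl (fun b s => max b (pvRk s)) a = max a (l.foldl (fun b s => max b (pvRk s)) 0) := by
  induction l generalizing a with
  | nil => simp [max_eq_left ha]
  | cons x t ih =>
    simp only [List.foldl_cons]
    rw [ih (max a (pvRk x)) (le_max_of_le_left ha), ih (max 0 (pvRk x)) (le_max_left 0 _),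
        max_eq_right (pvRk_nonneg x), max_assoc]

lemma pvM_eq (l : List String) :
    l.foldl (fun b s => max b (pvRk s)) 0 =
    if l.contains "breaking" then 3 else if l.contains "high" then 2
    else if l.contains "medium" then 1 else 0 := by
  induction l with
  | nil => simp
  | cons x t ih =>
    simp only [List.foldl_cons, List.contains_cons]
    rw [pvFoldl_max_acc t _ (le_max_left 0 _), ih, max_eq_right (pvRk_nonneg x), pvRk_eq]
    simp only [Bool.or_eq_true, beq_iff_eq]
    split_ifs <;> (try simp_all) <;> subst_vars <;> simp_all

-- ===== VERDICT (by name: the statement is the Claim_ definition above) =====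
theorem determine_impact_level_py_spec : Claim_equal_determine_impact_level_py := by
  intro changes _
  unfold Spec_determine_impact_level_py determine_impact_level_py determine_impact_level_py_alt
  by_cases h : changes = []
  · simp [h]
  · simp only [if_neg h]
    have hf : changes.foldl
        (fun best change => max best (pvRankDict.getD (pvGetImpact change) 0)) 0
        = (changes.map pvGetImpact).foldl (fun b s => max b (pvRk s)) 0 := by
      rw [List.foldl_map]; rfl
    rw [hf, pvM_eq]
    split_ifs <;> rfl
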